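-- pv_equiv track=rewrite | github.com/random-mongol/auto-fb | fb_messenger.py | looks_like_notification_label
-- ===== SOURCE A (Python) =====
-- def looks_like_notification_label(name: str | None) -> bool:
--     if not name:
--         return True
--
--     lowered = " ".join(name.split()).lower()
--     return any(
--         token in lowered
--         for token in [
--             "mark as read",
--             "posted in",
--             "posted 2 new reels",
--             "posted a reel",
--             "posted a photo",
--             "unread",
--         ]
--     )
-- ===== SOURCE B (Python) =====
-- _LABELS = (
--     "mark as read",
--     "posted in",
--     "posted 2 new reels",
--     "posted a reel",
--     "posted a photo",
--     "unread",
-- )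
--
--
-- def looks_like_notification_label(name):
--     if not name:
--         return True
--
--     lowered = " ".join(name.split()).lower()
--     # one left-to-right pass: at each position, test whether any label starts there
--     for i in range(len(lowered)):
--         for label in _LABELS:
--             if lowered.startswith(label, i):
--                 return True
--     return False
-- ===== Notes on version B (the rewrite author's own statement) =====
-- stated objective: alternative
-- what changed: Replaces the needle-major any(token in lowered) chain of six independent substring searches by a single position-major left-to-right scan that tests at each position whether one of the fixed labels starts there (and returns at the first hit).
import Mathlib
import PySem

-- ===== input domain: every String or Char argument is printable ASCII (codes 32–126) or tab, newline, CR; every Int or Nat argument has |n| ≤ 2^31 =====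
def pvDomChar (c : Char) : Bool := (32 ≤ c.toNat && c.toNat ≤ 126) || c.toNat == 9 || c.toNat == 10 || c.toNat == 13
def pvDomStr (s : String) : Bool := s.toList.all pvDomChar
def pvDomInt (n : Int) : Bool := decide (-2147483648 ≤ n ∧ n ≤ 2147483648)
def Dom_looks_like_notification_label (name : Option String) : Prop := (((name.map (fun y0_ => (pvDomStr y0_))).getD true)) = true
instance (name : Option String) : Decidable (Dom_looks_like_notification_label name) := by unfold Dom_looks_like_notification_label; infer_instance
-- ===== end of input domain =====

-- B replaces the needle-major chain of six substring searches by one position-major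
-- left-to-right scan testing each fixed label as a prefix at every position (alternative, not claimed faster).

-- ===== PORT A =====
def looks_like_notification_label (name : Option String) : Bool :=
  match name with
  | none => true
  | some n =>
    if n = "" then true
    else
      let lowered := PySem.Str.lower (PySem.Str.join " " (PySem.Str.split₀ n))
      [("mark as read" : String), "posted in", "posted 2 new reels",
       "posted a reel", "posted a photo", "unread"].any
        (fun token => PySem.Str.isIn token lowered)

-- ===== PORT B =====
def nlLabels : List (List Char) :=
  ["mark as read".toList, "posted in".toList, "posted 2 new reels".toList,
   "posted a reel".toList, "posted a photo".toList, "unread".toList]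

-- the inner 'for label: if lowered.startswith(label, i)' at one scan position
-- (exact port of str.startswith(label, i) applied to the suffix at i)
def nlScan : List Char → Bool
  | [] => false
  | c :: rest => nlLabels.any (fun t => t.isPrefixOf (c :: rest)) || nlScan rest

def looks_like_notification_label_alt (name : Option String) : Bool :=
  match name with
  | none => true
  | some n =>
    if n = "" then true
    else
      let lowered := PySem.Str.lower (PySem.Str.join " " (PySem.Str.split₀ n))
      nlScan lowered.toList

-- ===== PRECONDITION & SPEC =====
def Spec_looks_like_notification_label (name : Option String) (out : Bool) : Prop := out = looks_like_notification_label_alt name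
instance (name : Option String) (out : Bool) : Decidable (Spec_looks_like_notification_label name out) := by unfold Spec_looks_like_notification_label; infer_instance

-- ===== CLAIM (what is proved, stated in full; the proofs are below) =====
def Claim_equal_looks_like_notification_label : Prop := ∀ (name : Option String), Dom_looks_like_notification_label name → Spec_looks_like_notification_label name (looks_like_notification_label name)

-- ===== LEMMAS AND PROOFS =====

theorem nlLabels_ne_nil : ∀ t ∈ nlLabels, t ≠ [] := by decide

theorem nlScan_iff (s : List Char) :
    nlScan s = true ↔ ∃ t ∈ nlLabels, ∃ j : Nat, t <+: s.drop j := by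
  induction s with
  | nil =>
    simp only [nlScan, List.drop_nil]
    rw [show (false = true) ↔ False by simp, false_iff]
    rintro ⟨t, ht, _, hp⟩
    exact nlLabels_ne_nil t ht (List.prefix_nil.mp hp)
  | cons c rest ih =>
    simp only [nlScan, Bool.or_eq_true, List.any_eq_true, List.isPrefixOf_iff_prefix, ih]
    constructor
    · rintro (⟨t, ht, hp⟩ | ⟨t, ht, j, hp⟩)
      · exact ⟨t, ht, 0, hp⟩
      · exact ⟨t, ht, j + 1, hp⟩
    · rintro ⟨t, ht, j, hp⟩
      cases j with
      | zero => exact Or.inl ⟨t, ht, hp⟩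
      | succ j => exact Or.inr ⟨t, ht, j, hp⟩

theorem any_isIn_eq_nlScan (s : List Char) :
    nlLabels.any (fun t => PySem.Chars.isIn t s) = nlScan s := by
  rw [Bool.eq_iff_iff, List.any_eq_true, nlScan_iff]
  constructor
  · rintro ⟨t, ht, hin⟩
    obtain ⟨j, hp⟩ := (PySem.Chars.exists_prefix_drop_iff_isIn t s).mpr hin
    exact ⟨t, ht, j, hp⟩
  · rintro ⟨t, ht, j, hp⟩
    exact ⟨t, ht, (PySem.Chars.exists_prefix_drop_iff_isIn t s).mp ⟨j, hp⟩⟩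

-- ===== VERDICT (by name: the statement is the Claim_ definition above) =====
theorem looks_like_notification_label_spec : Claim_equal_looks_like_notification_label := by
  intro name _
  unfold Spec_looks_like_notification_label looks_like_notification_label looks_like_notification_label_alt
  match name with
  | none => rfl
  | some n =>
    by_cases h : n = ""
    · simp [h]
    · simp only [h, if_false]
      rw [← any_isIn_eq_nlScan]
      simp [nlLabels, PySem.Str.isIn]
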